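-- pv_equiv track=rewrite | github.com/gvMicroarctic/GlacialMeltwaterMicrobiome | BIOINFORMATICS/taxonomy_viral_merge.py | path_in
-- ===== SOURCE A (Python) =====
-- def path_in(path):
--
-- 	if "d__" not in path:
-- 		path = path + ";d__Unclassified"
--
-- 	if "p__" not in path:
-- 		path = path + ";p__Unclassified"
--
-- 	if "c__" not in path:
-- 		path = path + ";c__Unclassified"
--
-- 	if "o__" not in path:
-- 		path = path + ";o__Unclassified"
--
-- 	if "f__" not in path:
-- 		path = path + ";f__Unclassified"
--
-- 	path_info = path.split(";")
--
-- 	for taxon in path_info: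
-- 		if "d__" in taxon:
-- 			domain_t = taxon
-- 	for taxon in path_info:
-- 		if "p__" in taxon:
-- 			phylum_t = taxon
-- 	for taxon in path_info:
-- 		if "c__" in taxon:
-- 			class_t = taxon
-- 	for taxon in path_info:
-- 		if "o__" in taxon:
-- 			order_t = taxon
-- 	for taxon in path_info:
-- 		if "f__" in taxon:
-- 			family_t = taxon
--
-- 	#return string to print
-- 	return domain_t, phylum_t, class_t, order_t, family_t
-- ===== SOURCE B (Python) =====
-- def path_in(path):
--     tags = ("d__", "p__", "c__", "o__", "f__")
--     ranks = {}
--     for seg in path.split(";"):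
--         for tag in tags:
--             if tag in seg:
--                 ranks[tag] = seg
--     return tuple(ranks.get(tag, tag + "Unclassified") for tag in tags)
-- ===== Notes on version B (the rewrite author's own statement) =====
-- stated objective: simpler
-- what changed: B drops the five whole-path guard appends and the five separate rescanning loops: it splits once and makes a single pass over the segments, recording each segment in a dict under every rank prefix it contains (last match wins), then reads the five ranks from the dict with a per-rank unclassified default.
import Mathlib
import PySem

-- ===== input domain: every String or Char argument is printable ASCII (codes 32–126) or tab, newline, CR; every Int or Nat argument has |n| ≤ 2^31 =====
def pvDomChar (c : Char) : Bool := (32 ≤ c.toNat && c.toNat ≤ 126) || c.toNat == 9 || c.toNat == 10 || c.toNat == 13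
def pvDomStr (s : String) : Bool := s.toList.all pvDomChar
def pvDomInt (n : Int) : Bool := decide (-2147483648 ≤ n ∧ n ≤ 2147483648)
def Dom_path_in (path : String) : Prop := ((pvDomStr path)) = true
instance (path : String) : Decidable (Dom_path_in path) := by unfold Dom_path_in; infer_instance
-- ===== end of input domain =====

-- B replaces A's five separate re-scanning loops by a single pass over the split segments that
-- records each segment in a dict under every rank prefix it contains (last match wins), reading
-- the five ranks with per-rank "X__Unclassified" defaults instead of A's whole-path guard appends.

-- ===== PORT A =====
-- ';' is a nonempty separator, so s.split(";") never raises: `(split? …).getD []` takes the `some`.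
-- Python's five loop variables would be unbound (NameError) if a loop never matched; after the five
-- guard appends every loop matches, so the `.getD ""` default below is never taken.
def path_in (path : String) : String × String × String × String × String :=
  let p1 := if PySem.Str.isIn "d__" path then path else path ++ ";d__Unclassified"
  let p2 := if PySem.Str.isIn "p__" p1 then p1 else p1 ++ ";p__Unclassified"
  let p3 := if PySem.Str.isIn "c__" p2 then p2 else p2 ++ ";c__Unclassified"
  let p4 := if PySem.Str.isIn "o__" p3 then p3 else p3 ++ ";o__Unclassified"
  let p5 := if PySem.Str.isIn "f__" p4 then p4 else p4 ++ ";f__Unclassified"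
  let path_info : List String := (PySem.Str.split? p5 ";").getD []
  let domain_t := path_info.foldl (fun acc taxon => if PySem.Str.isIn "d__" taxon then some taxon else acc) (none : Option String)
  let phylum_t := path_info.foldl (fun acc taxon => if PySem.Str.isIn "p__" taxon then some taxon else acc) (none : Option String)
  let class_t := path_info.foldl (fun acc taxon => if PySem.Str.isIn "c__" taxon then some taxon else acc) (none : Option String)
  let order_t := path_info.foldl (fun acc taxon => if PySem.Str.isIn "o__" taxon then some taxon else acc) (none : Option String)
  let family_t := path_info.foldl (fun acc taxon => if PySem.Str.isIn "f__" taxon then some taxon else acc) (none : Option String)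
  (domain_t.getD "", phylum_t.getD "", class_t.getD "", order_t.getD "", family_t.getD "")

-- ===== PORT B =====
def path_in_alt (path : String) : String × String × String × String × String :=
  let tags : List String := ["d__", "p__", "c__", "o__", "f__"]
  let segs : List String := (PySem.Str.split? path ";").getD []
  let ranks : PySem.Dict String String :=
    segs.foldl (fun d seg =>
      tags.foldl (fun d tag => if PySem.Str.isIn tag seg then d.insert tag seg else d) d)
      PySem.Dict.empty
  (ranks.getD "d__" "d__Unclassified", ranks.getD "p__" "p__Unclassified",
   ranks.getD "c__" "c__Unclassified", ranks.getD "o__" "o__Unclassified",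
   ranks.getD "f__" "f__Unclassified")

-- ===== PRECONDITION & SPEC =====
def Spec_path_in (path : String) (out : String × String × String × String × String) : Prop := out = path_in_alt path
instance (path : String) (out : String × String × String × String × String) : Decidable (Spec_path_in path out) := by unfold Spec_path_in; infer_instance

-- ===== CLAIM (what is proved, stated in full; the proofs are below) =====
def Claim_equal_path_in : Prop := ∀ (path : String), Dom_path_in path → Spec_path_in path (path_in path)

-- ===== LEMMAS AND PROOFS =====

/-- Splitting a character list at ';' (structural recursion); equal to `Chars.splitOn s [';']`. -/
def splitSemi : List Char → List (List Char)
  | [] => [[]]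
  | c :: rest => if c = ';' then [] :: splitSemi rest else (splitSemi rest).modifyHead (fun h => c :: h)

lemma splitSemi_ne_nil (s : List Char) : splitSemi s ≠ [] := by
  induction s with
  | nil => simp [splitSemi]
  | cons c rest ih =>
    by_cases hc : c = ';'
    · simp [splitSemi, hc]
    · obtain ⟨h0, t0, hst⟩ := List.exists_cons_of_ne_nil ih
      simp [splitSemi, hc, hst]

lemma splitSemi_go (fuel : Nat) (l cur : List Char) (acc : List (List Char)) (hf : l.length < fuel) :
    PySem.Chars.splitOn.go [';'] fuel l cur acc
      = acc.reverse ++ (splitSemi l).modifyHead (fun h0 => cur.reverse ++ h0) := by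
  induction fuel generalizing l cur acc with
  | zero => omega
  | succ fuel ih =>
    cases l with
    | nil =>
      rw [PySem.Chars.splitOn.go.eq_def]
      simp [splitSemi]
    | cons c rest =>
      by_cases hc : c = ';'
      · subst hc
        have hstep : PySem.Chars.splitOn.go [';'] (fuel + 1) (';' :: rest) cur acc
            = PySem.Chars.splitOn.go [';'] fuel rest [] (cur.reverse :: acc) := by
          rw [PySem.Chars.splitOn.go.eq_def]
          simp [List.isPrefixOf]
        rw [hstep, ih rest [] (cur.reverse :: acc) (by simp at hf; omega)]
        obtain ⟨h0, t0, hst⟩ := List.exists_cons_of_ne_nil (splitSemi_ne_nil rest)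
        simp [splitSemi, hst]
      · have hcc : ((';' : Char) == c) = false := beq_eq_false_iff_ne.mpr (Ne.symm hc)
        have hstep : PySem.Chars.splitOn.go [';'] (fuel + 1) (c :: rest) cur acc
            = PySem.Chars.splitOn.go [';'] fuel rest (c :: cur) acc := by
          rw [PySem.Chars.splitOn.go.eq_def]
          simp [List.isPrefixOf, hcc]
        rw [hstep, ih rest (c :: cur) acc (by simp at hf; omega)]
        obtain ⟨h0, t0, hst⟩ := List.exists_cons_of_ne_nil (splitSemi_ne_nil rest)
        simp [splitSemi, hc, hst]

lemma splitOn_semi (s : List Char) : PySem.Chars.splitOn s [';'] = splitSemi s := by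
  unfold PySem.Chars.splitOn
  rw [splitSemi_go (s.length + 1) s [] [] (by omega)]
  obtain ⟨h0, t0, hst⟩ := List.exists_cons_of_ne_nil (splitSemi_ne_nil s)
  simp [hst]

lemma splitSemi_append (a b : List Char) :
    splitSemi (a ++ ';' :: b) = splitSemi a ++ splitSemi b := by
  induction a with
  | nil => simp [splitSemi]
  | cons c rest ih =>
    by_cases hc : c = ';'
    · simp [splitSemi, hc, ih]
    · obtain ⟨h0, t0, hst⟩ := List.exists_cons_of_ne_nil (splitSemi_ne_nil rest)
      rw [hst] at ih
      simp [splitSemi, hc, ih, hst]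

lemma splitSemi_no_semi (x : List Char) (hx : (';' : Char) ∉ x) : splitSemi x = [x] := by
  induction x with
  | nil => rfl
  | cons c rest ih =>
    have hc : c ≠ ';' := fun h => hx (h ▸ List.mem_cons_self ..)
    have hrest : (';' : Char) ∉ rest := fun h => hx (List.mem_cons_of_mem _ h)
    simp [splitSemi, hc, ih hrest]

lemma splitSemi_head (s : List Char) :
    ∃ t, splitSemi s = (s.takeWhile (fun c => !(c == ';'))) :: t := by
  induction s with
  | nil => exact ⟨[], rfl⟩
  | cons c rest ih =>
    obtain ⟨t, ht⟩ := ih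
    by_cases hc : c = ';'
    · exact ⟨splitSemi rest, by simp [splitSemi, hc, List.takeWhile_cons]⟩
    · exact ⟨t, by simp [splitSemi, hc, List.takeWhile_cons, ht]⟩

lemma splitSemi_parts (s : List Char) :
    ∃ h t, splitSemi s = h :: t ∧ h <+: s ∧ ∀ x ∈ t, x <:+: s := by
  induction s with
  | nil => exact ⟨[], [], rfl, List.nil_prefix, by simp⟩
  | cons c rest ih =>
    obtain ⟨h, t, hst, hpre, hinf⟩ := ih
    by_cases hc : c = ';'
    · refine ⟨[], splitSemi rest, by simp [splitSemi, hc], List.nil_prefix, ?_⟩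
      intro x hx
      rw [hst] at hx
      rcases List.mem_cons.mp hx with rfl | hx
      · exact List.infix_cons_iff.mpr (Or.inr hpre.isInfix)
      · exact List.infix_cons_iff.mpr (Or.inr (hinf x hx))
    · refine ⟨c :: h, t, by simp [splitSemi, hc, hst], ?_, ?_⟩
      · exact List.cons_prefix_cons.mpr ⟨rfl, hpre⟩
      · intro x hx
        exact List.infix_cons_iff.mpr (Or.inr (hinf x hx))

lemma prefix_takeWhile (p : Char → Bool) :
    ∀ (l s : List Char), l <+: s → (∀ c ∈ l, p c = true) → l <+: s.takeWhile p := by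
  intro l
  induction l with
  | nil => intro s _ _; exact List.nil_prefix
  | cons a l' ih =>
    intro s hpre hall
    cases s with
    | nil => simp at hpre
    | cons b s' =>
      obtain ⟨rfl, hl⟩ := List.cons_prefix_cons.mp hpre
      have hpa : p a = true := hall a (List.mem_cons_self ..)
      rw [List.takeWhile_cons, hpa]
      exact List.cons_prefix_cons.mpr ⟨rfl, ih s' hl (fun c hc => hall c (List.mem_cons_of_mem _ hc))⟩

lemma isIn_segs (t s : List Char) (hne : t ≠ []) (hsemi : (';' : Char) ∉ t) :
    PySem.Chars.isIn t s = true ↔ ∃ seg ∈ splitSemi s, PySem.Chars.isIn t seg = true := by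
  constructor
  · intro h
    rw [PySem.Chars.isIn_iff_infix] at h
    induction s with
    | nil =>
      rw [List.infix_nil] at h
      exact absurd h hne
    | cons c rest ih =>
      rcases List.infix_cons_iff.mp h with hp | hi
      · have hall : ∀ ch ∈ t, (!(ch == ';')) = true := by
          intro ch hch
          simp only [Bool.not_eq_eq_eq_not, Bool.not_true, beq_eq_false_iff_ne, ne_eq]
          exact fun e => hsemi (e ▸ hch)
        have htw := prefix_takeWhile _ t (c :: rest) hp hall
        obtain ⟨tl, htl⟩ := splitSemi_head (c :: rest)
        refine ⟨_, by rw [htl]; exact List.mem_cons_self .., ?_⟩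
        exact (PySem.Chars.isIn_iff_infix _ _).mpr htw.isInfix
      · obtain ⟨seg, hmem, hseg⟩ := ih hi
        by_cases hc : c = ';'
        · exact ⟨seg, by simp [splitSemi, hc]; right; exact hmem, hseg⟩
        · obtain ⟨h0, t0, hst⟩ := List.exists_cons_of_ne_nil (splitSemi_ne_nil rest)
          rw [hst] at hmem
          rcases List.mem_cons.mp hmem with rfl | hmem'
          · refine ⟨c :: seg, by simp [splitSemi, hc, hst], ?_⟩
            rw [PySem.Chars.isIn_iff_infix] at hseg ⊢
            exact List.infix_cons_iff.mpr (Or.inr hseg)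
          · exact ⟨seg, by simp [splitSemi, hc, hst]; right; exact hmem', hseg⟩
  · rintro ⟨seg, hmem, hseg⟩
    rw [PySem.Chars.isIn_iff_infix] at hseg ⊢
    obtain ⟨h, tl, hst, hpre, hinf⟩ := splitSemi_parts s
    rw [hst] at hmem
    rcases List.mem_cons.mp hmem with rfl | hmem'
    · exact hseg.trans hpre.isInfix
    · exact hseg.trans (hinf seg hmem')

/-- Last element of `xs` satisfying `p` (the value A's scanning loops and B's dict keep). -/
def pickLast {α : Type} (p : α → Bool) (xs : List α) : Option α :=
  xs.foldl (fun acc x => if p x then some x else acc) none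

lemma foldl_pick {α : Type} (p : α → Bool) (xs : List α) (a : Option α) :
    xs.foldl (fun acc x => if p x then some x else acc) a = (pickLast p xs).or a := by
  induction xs generalizing a with
  | nil => simp [pickLast]
  | cons y ys ih =>
    rw [List.foldl_cons, ih]
    have h2 : pickLast p (y :: ys) = List.foldl (fun acc x => if p x then some x else acc) (if p y then some y else none) ys := rfl
    rw [h2, ih, Option.or_assoc]
    cases hp : p y <;> simp [hp]

lemma pickLast_cons {α : Type} (p : α → Bool) (y : α) (ys : List α) :
    pickLast p (y :: ys) = (pickLast p ys).or (if p y then some y else none) := by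
  have h2 : pickLast p (y :: ys) = List.foldl (fun acc x => if p x then some x else acc) (if p y then some y else none) ys := rfl
  rw [h2, foldl_pick]

lemma pickLast_append {α : Type} (p : α → Bool) (xs ys : List α) :
    pickLast p (xs ++ ys) = (pickLast p ys).or (pickLast p xs) := by
  unfold pickLast
  rw [List.foldl_append, foldl_pick]
  rfl

lemma pickLast_none_iff {α : Type} (p : α → Bool) (xs : List α) :
    pickLast p xs = none ↔ ∀ x ∈ xs, p x = false := by
  induction xs with
  | nil => simp [pickLast]
  | cons y ys ih =>
    rw [pickLast_cons]
    cases hp : p y <;> cases h : pickLast p ys <;> simp_all [Option.or]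

lemma pickLast_isSome {α : Type} (p : α → Bool) (xs : List α) (x : α)
    (hx : x ∈ xs) (hpx : p x = true) : ∃ v, pickLast p xs = some v := by
  cases h : pickLast p xs with
  | some v => exact ⟨v, rfl⟩
  | none =>
    rw [pickLast_none_iff] at h
    rw [h x hx] at hpx
    cases hpx

lemma pickLast_unique {α : Type} (p : α → Bool) (xs : List α) (x : α)
    (hx : x ∈ xs) (hpx : p x = true) (huniq : ∀ y ∈ xs, p y = true → y = x) :
    pickLast p xs = some x := by
  induction xs with
  | nil => simp at hx
  | cons y ys ih =>
    rw [pickLast_cons]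
    by_cases hall : ∀ z ∈ ys, p z = false
    · have hnone : pickLast p ys = none := (pickLast_none_iff p ys).mpr hall
      have hxy : x = y := by
        rcases List.mem_cons.mp hx with rfl | hx'
        · rfl
        · rw [hall x hx'] at hpx; cases hpx
      subst hxy
      rw [hnone, hpx]
      rfl
    · push_neg at hall
      obtain ⟨z, hz, hpz⟩ := hall
      have hpz' : p z = true := by
        cases h : p z
        · exact absurd h hpz
        · rfl
      have hzx : z = x := huniq z (List.mem_cons_of_mem _ hz) hpz'
      subst hzx
      rw [ih hz (fun w hw hpw => huniq w (List.mem_cons_of_mem _ hw) hpw)]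
      rfl

lemma pickLast_map (pS : String → Bool) (pC : List Char → Bool)
    (h : ∀ x, pS (String.ofList x) = pC x) (xs : List (List Char)) :
    pickLast pS (xs.map String.ofList) = Option.map String.ofList (pickLast pC xs) := by
  suffices haux : ∀ a : Option (List Char),
      (xs.map String.ofList).foldl (fun acc x => if pS x then some x else acc) (Option.map String.ofList a)
        = Option.map String.ofList (xs.foldl (fun acc x => if pC x then some x else acc) a) by
    simpa using haux none
  induction xs with
  | nil => intro a; simp
  | cons y ys ih =>
    intro a
    rw [List.map_cons, List.foldl_cons, List.foldl_cons]
    cases hp : pC y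
    · rw [h y, hp]
      simpa using ih a
    · have : (if pS (String.ofList y) then some (String.ofList y) else Option.map String.ofList a)
          = Option.map String.ofList (some y) := by rw [h y, hp]; simp
      rw [this]
      exact ih (some y)

lemma pick_str (t : String) (segs : List (List Char)) :
    (segs.map String.ofList).foldl (fun acc s => if PySem.Str.isIn t s then some s else acc) (none : Option String)
      = Option.map String.ofList (pickLast (fun x => PySem.Chars.isIn t.toList x) segs) := by
  rw [show (segs.map String.ofList).foldl (fun acc s => if PySem.Str.isIn t s then some s else acc) (none : Option String)
      = pickLast (fun s => PySem.Str.isIn t s) (segs.map String.ofList) from rfl]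
  exact pickLast_map _ _ (fun x => by simp [PySem.Str.isIn_eq]) segs

lemma get?_cond_insert (b : Bool) (d : PySem.Dict String String) (k v t : String) :
    (if b then d.insert k v else d).get? t
      = if b then (if t = k then some v else d.get? t) else d.get? t := by
  cases b <;> simp [PySem.Dict.get?_insert]

lemma dict_fold_get_not (tags : List String) (seg : String) (d : PySem.Dict String String)
    (t : String) (ht : t ∉ tags) :
    (tags.foldl (fun d tag => if PySem.Str.isIn tag seg then d.insert tag seg else d) d).get? t
      = d.get? t := by
  induction tags generalizing d with
  | nil => rfl
  | cons k ks ih =>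
    have hk : t ≠ k := fun h => ht (h ▸ List.mem_cons_self ..)
    rw [List.foldl_cons, ih _ (fun h => ht (List.mem_cons_of_mem _ h)), get?_cond_insert]
    cases hb : PySem.Str.isIn k seg <;> simp [hk]

lemma dict_fold_get (tags : List String) (seg : String) (d : PySem.Dict String String)
    (t : String) (ht : t ∈ tags) (hnd : tags.Nodup) :
    (tags.foldl (fun d tag => if PySem.Str.isIn tag seg then d.insert tag seg else d) d).get? t
      = if PySem.Str.isIn t seg then some seg else d.get? t := by
  induction tags generalizing d with
  | nil => cases ht
  | cons k ks ih =>
    rw [List.foldl_cons]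
    rcases List.mem_cons.mp ht with rfl | hmem
    · have hnotin : t ∉ ks := (List.nodup_cons.mp hnd).1
      rw [dict_fold_get_not ks seg _ t hnotin, get?_cond_insert]
      simp
    · have hk : t ≠ k := by
        rintro rfl
        exact (List.nodup_cons.mp hnd).1 hmem
      rw [ih _ hmem (List.nodup_cons.mp hnd).2, get?_cond_insert]
      cases hb : PySem.Str.isIn k seg <;> simp [hk]

lemma dict_inner (seg : String) (d : PySem.Dict String String) (t : String)
    (ht : t ∈ (["d__", "p__", "c__", "o__", "f__"] : List String)) :
    ((["d__", "p__", "c__", "o__", "f__"] : List String).foldl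
        (fun d tag => if PySem.Str.isIn tag seg then d.insert tag seg else d) d).get? t
      = if PySem.Str.isIn t seg then some seg else d.get? t :=
  dict_fold_get _ seg d t ht (by simp)

lemma dict_get_aux (segs : List String) (d : PySem.Dict String String) (t : String)
    (ht : t ∈ (["d__", "p__", "c__", "o__", "f__"] : List String)) :
    (segs.foldl (fun d seg =>
        (["d__", "p__", "c__", "o__", "f__"] : List String).foldl
          (fun d tag => if PySem.Str.isIn tag seg then d.insert tag seg else d) d) d).get? t
      = (pickLast (fun s => PySem.Str.isIn t s) segs).or (d.get? t) := by
  induction segs generalizing d with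
  | nil => simp [pickLast]
  | cons seg ss ih =>
    rw [List.foldl_cons, ih, dict_inner seg d t ht, pickLast_cons, Option.or_assoc]
    cases hp : PySem.Str.isIn t seg <;> simp [hp]

/-- The segment-level chunk a guard appends to the character list. -/
def chunkC (c : Bool) (x : List Char) : List Char := if c then [] else ';' :: x

/-- The same chunk as extra segments after splitting. -/
def chunkS (c : Bool) (x : List Char) : List (List Char) := if c then [] else [x]

lemma mem_chunkS {x y : List Char} {c : Bool} (h : y ∈ chunkS c x) : c = false ∧ y = x := by
  cases c <;> simp_all [chunkS]

lemma toList_guard (b : Bool) (s t : String) (tc : List Char) (ht : t.toList = ';' :: tc) :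
    (if b then s else s ++ t).toList = s.toList ++ chunkC b tc := by
  cases b <;> simp [chunkC, String.toList_append, ht]

lemma isIn_chunkC (t a x : List Char) (hne : t ≠ []) (hts : (';' : Char) ∉ t)
    (hxs : (';' : Char) ∉ x) (hfalse : PySem.Chars.isIn t x = false) (c : Bool) :
    PySem.Chars.isIn t (a ++ chunkC c x) = PySem.Chars.isIn t a := by
  cases c
  · show PySem.Chars.isIn t (a ++ ';' :: x) = PySem.Chars.isIn t a
    rw [Bool.eq_iff_iff, isIn_segs t _ hne hts, isIn_segs t a hne hts,
      splitSemi_append, splitSemi_no_semi x hxs]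
    constructor
    · rintro ⟨seg, hmem, hseg⟩
      rcases List.mem_append.mp hmem with hl | hr
      · exact ⟨seg, hl, hseg⟩
      · simp only [List.mem_singleton] at hr
        subst hr
        rw [hfalse] at hseg
        cases hseg
    · rintro ⟨seg, hmem, hseg⟩
      exact ⟨seg, List.mem_append.mpr (Or.inl hmem), hseg⟩
  · simp [chunkC]

lemma splitSemi_chunkC (a x : List Char) (hxs : (';' : Char) ∉ x) (c : Bool) :
    splitSemi (a ++ chunkC c x) = splitSemi a ++ chunkS c x := by
  cases c <;> simp [chunkC, chunkS, splitSemi_append, splitSemi_no_semi x hxs]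

lemma component_eq (L t dfl : List Char) (dfltS : String) (extras : List (List Char))
    (hne : t ≠ []) (hsemi : (';' : Char) ∉ t) (hdfl : String.ofList dfl = dfltS)
    (hcase : (PySem.Chars.isIn t L = true ∧ pickLast (fun x => PySem.Chars.isIn t x) extras = none)
           ∨ (PySem.Chars.isIn t L = false ∧ pickLast (fun x => PySem.Chars.isIn t x) extras = some dfl)) :
    (Option.map String.ofList (pickLast (fun x => PySem.Chars.isIn t x) (splitSemi L ++ extras))).getD ""
      = (Option.map String.ofList (pickLast (fun x => PySem.Chars.isIn t x) (splitSemi L))).getD dfltS := by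
  rw [pickLast_append]
  rcases hcase with ⟨hc, he⟩ | ⟨hc, he⟩
  · rw [he, Option.none_or]
    obtain ⟨seg, hmem, hseg⟩ := (isIn_segs t L hne hsemi).mp hc
    obtain ⟨v, hv⟩ := pickLast_isSome _ _ _ hmem hseg
    rw [hv]
    rfl
  · have h0 : pickLast (fun x => PySem.Chars.isIn t x) (splitSemi L) = none := by
      rw [pickLast_none_iff]
      intro x hx
      cases hix : PySem.Chars.isIn t x
      · rfl
      · have := (isIn_segs t L hne hsemi).mpr ⟨x, hx, hix⟩
        rw [hc] at this
        cases this
    rw [he, h0]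
    simpa using hdfl

lemma split_semi_str (s : String) :
    (PySem.Str.split? s ";").getD [] = (splitSemi s.toList).map String.ofList := by
  have : (";" : String).toList = [';'] := rfl
  simp [PySem.Str.split?, PySem.Chars.split?, this, splitOn_semi]

lemma pick_str' (t : String) (segs : List (List Char)) :
    pickLast (fun s => PySem.Str.isIn t s) (segs.map String.ofList)
      = Option.map String.ofList (pickLast (fun x => PySem.Chars.isIn t.toList x) segs) :=
  pickLast_map _ _ (fun x => by simp [PySem.Str.isIn_eq]) segs

set_option maxHeartbeats 1000000 in
lemma path_in_eq (path : String) : path_in path = path_in_alt path := by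
  simp only [path_in, path_in_alt]
  set p1 := if PySem.Str.isIn "d__" path then path else path ++ ";d__Unclassified" with hd1
  set p2 := if PySem.Str.isIn "p__" p1 then p1 else p1 ++ ";p__Unclassified" with hd2
  set p3 := if PySem.Str.isIn "c__" p2 then p2 else p2 ++ ";c__Unclassified" with hd3
  set p4 := if PySem.Str.isIn "o__" p3 then p3 else p3 ++ ";o__Unclassified" with hd4
  set p5 := if PySem.Str.isIn "f__" p4 then p4 else p4 ++ ";f__Unclassified" with hd5
  have h1 : p1.toList = path.toList
      ++ chunkC (PySem.Chars.isIn "d__".toList path.toList) "d__Unclassified".toList := by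
    rw [hd1, PySem.Str.isIn_eq]
    exact toList_guard _ _ _ _ rfl
  have g2 : PySem.Str.isIn "p__" p1 = PySem.Chars.isIn "p__".toList path.toList := by
    rw [PySem.Str.isIn_eq, h1,
      isIn_chunkC "p__".toList _ "d__Unclassified".toList (by decide) (by decide) (by decide) (by decide)]
  have h2 : p2.toList = path.toList
      ++ chunkC (PySem.Chars.isIn "d__".toList path.toList) "d__Unclassified".toList
      ++ chunkC (PySem.Chars.isIn "p__".toList path.toList) "p__Unclassified".toList := by
    rw [hd2, g2, toList_guard _ _ ";p__Unclassified" ("p__Unclassified".toList) rfl, h1]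
  have g3 : PySem.Str.isIn "c__" p2 = PySem.Chars.isIn "c__".toList path.toList := by
    rw [PySem.Str.isIn_eq, h2,
      isIn_chunkC "c__".toList _ "p__Unclassified".toList (by decide) (by decide) (by decide) (by decide),
      isIn_chunkC "c__".toList _ "d__Unclassified".toList (by decide) (by decide) (by decide) (by decide)]
  have h3 : p3.toList = path.toList
      ++ chunkC (PySem.Chars.isIn "d__".toList path.toList) "d__Unclassified".toList
      ++ chunkC (PySem.Chars.isIn "p__".toList path.toList) "p__Unclassified".toList
      ++ chunkC (PySem.Chars.isIn "c__".toList path.toList) "c__Unclassified".toList := by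
    rw [hd3, g3, toList_guard _ _ ";c__Unclassified" ("c__Unclassified".toList) rfl, h2]
  have g4 : PySem.Str.isIn "o__" p3 = PySem.Chars.isIn "o__".toList path.toList := by
    rw [PySem.Str.isIn_eq, h3,
      isIn_chunkC "o__".toList _ "c__Unclassified".toList (by decide) (by decide) (by decide) (by decide),
      isIn_chunkC "o__".toList _ "p__Unclassified".toList (by decide) (by decide) (by decide) (by decide),
      isIn_chunkC "o__".toList _ "d__Unclassified".toList (by decide) (by decide) (by decide) (by decide)]
  have h4 : p4.toList = path.toList
      ++ chunkC (PySem.Chars.isIn "d__".toList path.toList) "d__Unclassified".toList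
      ++ chunkC (PySem.Chars.isIn "p__".toList path.toList) "p__Unclassified".toList
      ++ chunkC (PySem.Chars.isIn "c__".toList path.toList) "c__Unclassified".toList
      ++ chunkC (PySem.Chars.isIn "o__".toList path.toList) "o__Unclassified".toList := by
    rw [hd4, g4, toList_guard _ _ ";o__Unclassified" ("o__Unclassified".toList) rfl, h3]
  have g5 : PySem.Str.isIn "f__" p4 = PySem.Chars.isIn "f__".toList path.toList := by
    rw [PySem.Str.isIn_eq, h4,
      isIn_chunkC "f__".toList _ "o__Unclassified".toList (by decide) (by decide) (by decide) (by decide),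
      isIn_chunkC "f__".toList _ "c__Unclassified".toList (by decide) (by decide) (by decide) (by decide),
      isIn_chunkC "f__".toList _ "p__Unclassified".toList (by decide) (by decide) (by decide) (by decide),
      isIn_chunkC "f__".toList _ "d__Unclassified".toList (by decide) (by decide) (by decide) (by decide)]
  have h5 : p5.toList = path.toList
      ++ chunkC (PySem.Chars.isIn "d__".toList path.toList) "d__Unclassified".toList
      ++ chunkC (PySem.Chars.isIn "p__".toList path.toList) "p__Unclassified".toList
      ++ chunkC (PySem.Chars.isIn "c__".toList path.toList) "c__Unclassified".toList
      ++ chunkC (PySem.Chars.isIn "o__".toList path.toList) "o__Unclassified".toList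
      ++ chunkC (PySem.Chars.isIn "f__".toList path.toList) "f__Unclassified".toList := by
    rw [hd5, g5, toList_guard _ _ ";f__Unclassified" ("f__Unclassified".toList) rfl, h4]
  have hsegs : splitSemi p5.toList = splitSemi path.toList
      ++ (chunkS (PySem.Chars.isIn "d__".toList path.toList) "d__Unclassified".toList
        ++ (chunkS (PySem.Chars.isIn "p__".toList path.toList) "p__Unclassified".toList
          ++ (chunkS (PySem.Chars.isIn "c__".toList path.toList) "c__Unclassified".toList
            ++ (chunkS (PySem.Chars.isIn "o__".toList path.toList) "o__Unclassified".toList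
              ++ chunkS (PySem.Chars.isIn "f__".toList path.toList) "f__Unclassified".toList)))) := by
    rw [h5,
      splitSemi_chunkC _ ("f__Unclassified".toList) (by decide),
      splitSemi_chunkC _ ("o__Unclassified".toList) (by decide),
      splitSemi_chunkC _ ("c__Unclassified".toList) (by decide),
      splitSemi_chunkC _ ("p__Unclassified".toList) (by decide),
      splitSemi_chunkC _ ("d__Unclassified".toList) (by decide)]
    simp [List.append_assoc]
  simp only [split_semi_str]
  rw [hsegs]
  simp only [pick_str, PySem.Dict.getD_eq_get?_getD]
  rw [dict_get_aux _ PySem.Dict.empty "d__" (by simp), dict_get_aux _ PySem.Dict.empty "p__" (by simp),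
    dict_get_aux _ PySem.Dict.empty "c__" (by simp), dict_get_aux _ PySem.Dict.empty "o__" (by simp),
    dict_get_aux _ PySem.Dict.empty "f__" (by simp)]
  simp only [PySem.Dict.get?_empty, Option.or_none, pick_str']
  simp only [Prod.mk.injEq]
  simp only [show "d__".toList = ['d', '_', '_'] from rfl,
    show "d__Unclassified".toList = ['d', '_', '_', 'U', 'n', 'c', 'l', 'a', 's', 's', 'i', 'f', 'i', 'e', 'd'] from rfl,
    show "p__".toList = ['p', '_', '_'] from rfl,
    show "p__Unclassified".toList = ['p', '_', '_', 'U', 'n', 'c', 'l', 'a', 's', 's', 'i', 'f', 'i', 'e', 'd'] from rfl,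
    show "c__".toList = ['c', '_', '_'] from rfl,
    show "c__Unclassified".toList = ['c', '_', '_', 'U', 'n', 'c', 'l', 'a', 's', 's', 'i', 'f', 'i', 'e', 'd'] from rfl,
    show "o__".toList = ['o', '_', '_'] from rfl,
    show "o__Unclassified".toList = ['o', '_', '_', 'U', 'n', 'c', 'l', 'a', 's', 's', 'i', 'f', 'i', 'e', 'd'] from rfl,
    show "f__".toList = ['f', '_', '_'] from rfl,
    show "f__Unclassified".toList = ['f', '_', '_', 'U', 'n', 'c', 'l', 'a', 's', 's', 'i', 'f', 'i', 'e', 'd'] from rfl]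
  refine ⟨?_, ?_, ?_, ?_, ?_⟩
  · refine component_eq path.toList ['d', '_', '_'] ['d', '_', '_', 'U', 'n', 'c', 'l', 'a', 's', 's', 'i', 'f', 'i', 'e', 'd'] "d__Unclassified" _
      (by decide) (by decide) rfl ?_
    by_cases hc : PySem.Chars.isIn ['d', '_', '_'] path.toList = true
    · refine Or.inl ⟨hc, ?_⟩
      rw [pickLast_none_iff]
      intro y hy
      simp only [List.mem_append] at hy
      rcases hy with h | h | h | h | h <;> obtain ⟨hcf, rfl⟩ := mem_chunkS h <;>
        first
        | decide
        | (rw [hc] at hcf; exact Bool.noConfusion hcf)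
    · have hc' : PySem.Chars.isIn ['d', '_', '_'] path.toList = false := by simpa using hc
      refine Or.inr ⟨hc', ?_⟩
      apply pickLast_unique
      · simp [chunkS, hc']
      · decide
      · intro y hy hpy
        simp only [List.mem_append] at hy
        rcases hy with h | h | h | h | h <;> obtain ⟨hcf, rfl⟩ := mem_chunkS h <;>
          first
          | rfl
          | exact absurd hpy (by decide)
  · refine component_eq path.toList ['p', '_', '_'] ['p', '_', '_', 'U', 'n', 'c', 'l', 'a', 's', 's', 'i', 'f', 'i', 'e', 'd'] "p__Unclassified" _
      (by decide) (by decide) rfl ?_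
    by_cases hc : PySem.Chars.isIn ['p', '_', '_'] path.toList = true
    · refine Or.inl ⟨hc, ?_⟩
      rw [pickLast_none_iff]
      intro y hy
      simp only [List.mem_append] at hy
      rcases hy with h | h | h | h | h <;> obtain ⟨hcf, rfl⟩ := mem_chunkS h <;>
        first
        | decide
        | (rw [hc] at hcf; exact Bool.noConfusion hcf)
    · have hc' : PySem.Chars.isIn ['p', '_', '_'] path.toList = false := by simpa using hc
      refine Or.inr ⟨hc', ?_⟩
      apply pickLast_unique
      · simp [chunkS, hc']
      · decide
      · intro y hy hpy
        simp only [List.mem_append] at hy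
        rcases hy with h | h | h | h | h <;> obtain ⟨hcf, rfl⟩ := mem_chunkS h <;>
          first
          | rfl
          | exact absurd hpy (by decide)
  · refine component_eq path.toList ['c', '_', '_'] ['c', '_', '_', 'U', 'n', 'c', 'l', 'a', 's', 's', 'i', 'f', 'i', 'e', 'd'] "c__Unclassified" _
      (by decide) (by decide) rfl ?_
    by_cases hc : PySem.Chars.isIn ['c', '_', '_'] path.toList = true
    · refine Or.inl ⟨hc, ?_⟩
      rw [pickLast_none_iff]
      intro y hy
      simp only [List.mem_append] at hy
      rcases hy with h | h | h | h | h <;> obtain ⟨hcf, rfl⟩ := mem_chunkS h <;>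
        first
        | decide
        | (rw [hc] at hcf; exact Bool.noConfusion hcf)
    · have hc' : PySem.Chars.isIn ['c', '_', '_'] path.toList = false := by simpa using hc
      refine Or.inr ⟨hc', ?_⟩
      apply pickLast_unique
      · simp [chunkS, hc']
      · decide
      · intro y hy hpy
        simp only [List.mem_append] at hy
        rcases hy with h | h | h | h | h <;> obtain ⟨hcf, rfl⟩ := mem_chunkS h <;>
          first
          | rfl
          | exact absurd hpy (by decide)
  · refine component_eq path.toList ['o', '_', '_'] ['o', '_', '_', 'U', 'n', 'c', 'l', 'a', 's', 's', 'i', 'f', 'i', 'e', 'd'] "o__Unclassified" _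
      (by decide) (by decide) rfl ?_
    by_cases hc : PySem.Chars.isIn ['o', '_', '_'] path.toList = true
    · refine Or.inl ⟨hc, ?_⟩
      rw [pickLast_none_iff]
      intro y hy
      simp only [List.mem_append] at hy
      rcases hy with h | h | h | h | h <;> obtain ⟨hcf, rfl⟩ := mem_chunkS h <;>
        first
        | decide
        | (rw [hc] at hcf; exact Bool.noConfusion hcf)
    · have hc' : PySem.Chars.isIn ['o', '_', '_'] path.toList = false := by simpa using hc
      refine Or.inr ⟨hc', ?_⟩
      apply pickLast_unique
      · simp [chunkS, hc']
      · decide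
      · intro y hy hpy
        simp only [List.mem_append] at hy
        rcases hy with h | h | h | h | h <;> obtain ⟨hcf, rfl⟩ := mem_chunkS h <;>
          first
          | rfl
          | exact absurd hpy (by decide)
  · refine component_eq path.toList ['f', '_', '_'] ['f', '_', '_', 'U', 'n', 'c', 'l', 'a', 's', 's', 'i', 'f', 'i', 'e', 'd'] "f__Unclassified" _
      (by decide) (by decide) rfl ?_
    by_cases hc : PySem.Chars.isIn ['f', '_', '_'] path.toList = true
    · refine Or.inl ⟨hc, ?_⟩
      rw [pickLast_none_iff]
      intro y hy
      simp only [List.mem_append] at hy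
      rcases hy with h | h | h | h | h <;> obtain ⟨hcf, rfl⟩ := mem_chunkS h <;>
        first
        | decide
        | (rw [hc] at hcf; exact Bool.noConfusion hcf)
    · have hc' : PySem.Chars.isIn ['f', '_', '_'] path.toList = false := by simpa using hc
      refine Or.inr ⟨hc', ?_⟩
      apply pickLast_unique
      · simp [chunkS, hc']
      · decide
      · intro y hy hpy
        simp only [List.mem_append] at hy
        rcases hy with h | h | h | h | h <;> obtain ⟨hcf, rfl⟩ := mem_chunkS h <;>
          first
          | rfl
          | exact absurd hpy (by decide)

-- ===== VERDICT (by name: the statement is the Claim_ definition above) =====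
theorem path_in_spec : Claim_equal_path_in := by
  intro path _
  unfold Spec_path_in
  exact path_in_eq path
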